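-- pv_equiv track=rewrite | github.com/PennyLaneAI/pennylane | pennylane/drawer/drawable_layers.py | _recursive_find_mcm_stats_layer
-- ===== SOURCE A (Python) =====
-- def _recursive_find_mcm_stats_layer(
--     layer_to_check, op_occupied_cwires, used_cwires_per_layer, bit_map
-- ):
--     """Determine correct layer for a terminal measurement that is collectings statistics
--     for mid-circuit measurement values.
--
--     Args:
--         layer_to_check (int): the function determines if the operation fits on this layer
--         op_occupied_cwires (set(int)): classical wires occupied by measurement
--         occupied_cwires_per_layer (list[set[int]]): which classical wires are already
--             in use for collecting statistics. Each set is a different layer.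
--         bit_map (dict): A map containing mid-circuit measurements used for classical conditions
--             or collecting statistics as keys
--
--     Returns:
--         int: layer to place measurement process in
--     """
--
--     if op_occupied_cwires & used_cwires_per_layer[layer_to_check]:
--         # this layer is occupied, use higher one
--         return layer_to_check + 1
--
--     if layer_to_check == 0:
--         # reached first layer, so stop
--         return 0
--     # keep pushing the operation to lower layers
--     return _recursive_find_mcm_stats_layer(
--         layer_to_check - 1, op_occupied_cwires, used_cwires_per_layer, bit_map
--     )
-- ===== SOURCE B (Python) =====
-- # B: one forward pass with an accumulator instead of downward recursion: walk
-- # layers 0..layer_to_check and remember the last (highest) intersecting layer.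
-- def _recursive_find_mcm_stats_layer(
--     layer_to_check, op_occupied_cwires, used_cwires_per_layer, bit_map
-- ):
--     result = 0
--     for i in range(layer_to_check + 1):
--         if op_occupied_cwires & used_cwires_per_layer[i]:
--             result = i + 1
--     return result
-- ===== Notes on version B (the rewrite author's own statement) =====
-- stated objective: simpler
-- what changed: Replaced the downward tail recursion with early return by a single forward for-loop over range(layer_to_check+1) that keeps an accumulator set to i+1 at each intersecting layer, so the last (highest) hit wins.
-- intended difference: For negative layer_to_check (except layer_to_check = -1 when the last layer already intersects, where both return 0), A scans via Python negative-index wraparound and returns an accidental non-positive layer index such as -1, while B's forward loop checks no layers and returns 0, the intended placement since there is no valid layer prefix below. — e.g. on _recursive_find_mcm_stats_layer(-2, [0], [[0], [1]], []): A returns -1, B returns 0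
import Mathlib
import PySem

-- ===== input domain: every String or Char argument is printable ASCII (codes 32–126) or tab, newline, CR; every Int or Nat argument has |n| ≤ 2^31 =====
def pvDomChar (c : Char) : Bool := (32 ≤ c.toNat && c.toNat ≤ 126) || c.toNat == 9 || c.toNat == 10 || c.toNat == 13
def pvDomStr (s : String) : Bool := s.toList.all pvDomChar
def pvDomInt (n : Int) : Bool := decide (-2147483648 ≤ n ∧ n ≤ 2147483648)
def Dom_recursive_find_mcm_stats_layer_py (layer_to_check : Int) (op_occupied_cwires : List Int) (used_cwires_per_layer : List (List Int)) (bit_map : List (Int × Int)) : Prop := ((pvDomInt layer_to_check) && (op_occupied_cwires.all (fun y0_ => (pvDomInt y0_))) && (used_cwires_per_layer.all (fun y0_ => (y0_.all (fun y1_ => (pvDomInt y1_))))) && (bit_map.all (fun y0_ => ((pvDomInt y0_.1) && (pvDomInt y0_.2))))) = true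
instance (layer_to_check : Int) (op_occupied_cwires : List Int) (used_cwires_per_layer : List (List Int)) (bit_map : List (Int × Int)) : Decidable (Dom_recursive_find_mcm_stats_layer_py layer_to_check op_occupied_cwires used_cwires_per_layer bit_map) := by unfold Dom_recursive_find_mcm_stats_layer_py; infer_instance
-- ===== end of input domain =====

-- B replaces A's downward early-return recursion by one forward accumulator pass over range(layer_to_check+1); on negative layer_to_check A returns accidental wraparound values, B returns 0 (stated as D_ below).
-- ===== PORT A =====
def pvInterNonempty (s t : List Int) : Bool := !(PySem.Set.inter s t).isEmpty

-- A's recursion, with fuel (enough for the wraparound descent; pyGet? wraps negative indices like Python)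
def pvARec (fuel : Nat) (layer : Int) (occ : List Int) (layers : List (List Int)) : Int :=
  match fuel with
  | 0 => 0
  | fuel' + 1 =>
    match PySem.List.pyGet? layers layer with
    | none => 0  -- IndexError; outside Pre_
    | some row =>
      if pvInterNonempty occ row then layer + 1
      else if layer = 0 then 0
      else pvARec fuel' (layer - 1) occ layers

def recursive_find_mcm_stats_layer_py (layer_to_check : Int) (op_occupied_cwires : List Int) (used_cwires_per_layer : List (List Int)) (bit_map : List (Int × Int)) : Int :=
  pvARec ((layer_to_check + used_cwires_per_layer.length).toNat + 2) layer_to_check op_occupied_cwires used_cwires_per_layer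

-- ===== PORT B =====
-- 'result = 0; for i in range(layer_to_check + 1): if occ & layers[i]: result = i + 1; return result'
def recursive_find_mcm_stats_layer_py_alt (layer_to_check : Int) (op_occupied_cwires : List Int) (used_cwires_per_layer : List (List Int)) (bit_map : List (Int × Int)) : Int :=
  (PySem.List.pyRange 0 (layer_to_check + 1) 1).foldl
    (fun result i =>
      if pvInterNonempty op_occupied_cwires (PySem.List.pyGetD used_cwires_per_layer i []) then i + 1
      else result)
    0

-- ===== PRECONDITION & SPEC =====
-- Pre_ is exactly where Python A returns normally: a valid non-negative layer index, or a negative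
-- one within wraparound range whose downward wrapped scan (positions layer_to_check+len .. 0) meets
-- an intersecting layer before running off the front (otherwise A raises IndexError).
def Pre_recursive_find_mcm_stats_layer_py (layer_to_check : Int) (op_occupied_cwires : List Int) (used_cwires_per_layer : List (List Int)) (bit_map : List (Int × Int)) : Prop :=
  (0 ≤ layer_to_check ∧ layer_to_check < (used_cwires_per_layer.length : Int)) ∨
  (layer_to_check < 0 ∧ -(used_cwires_per_layer.length : Int) ≤ layer_to_check ∧
    ∃ row ∈ used_cwires_per_layer.take (layer_to_check + used_cwires_per_layer.length + 1).toNat,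
      ∃ x ∈ op_occupied_cwires, x ∈ row)
instance (layer_to_check : Int) (op_occupied_cwires : List Int) (used_cwires_per_layer : List (List Int)) (bit_map : List (Int × Int)) : Decidable (Pre_recursive_find_mcm_stats_layer_py layer_to_check op_occupied_cwires used_cwires_per_layer bit_map) := by unfold Pre_recursive_find_mcm_stats_layer_py; infer_instance

def pvWitness_recursive_find_mcm_stats_layer_py : Int × List Int × List (List Int) × (List (Int × Int)) := (1, [1], [[1], [0]], [])

-- On negative layer_to_check (except l = -1 with the last layer already intersecting, where both
-- return 0) A returns an accidental non-positive layer index produced by negative-index wraparound,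
-- while B returns 0, the intended placement when there is no layer prefix to check.
def D_recursive_find_mcm_stats_layer_py (layer_to_check : Int) (op_occupied_cwires : List Int) (used_cwires_per_layer : List (List Int)) (bit_map : List (Int × Int)) : Prop :=
  layer_to_check < 0 ∧
  ¬(layer_to_check = -1 ∧ ∃ x ∈ op_occupied_cwires, x ∈ used_cwires_per_layer.getLastD [])
instance (layer_to_check : Int) (op_occupied_cwires : List Int) (used_cwires_per_layer : List (List Int)) (bit_map : List (Int × Int)) : Decidable (D_recursive_find_mcm_stats_layer_py layer_to_check op_occupied_cwires used_cwires_per_layer bit_map) := by unfold D_recursive_find_mcm_stats_layer_py; infer_instance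

def Spec_recursive_find_mcm_stats_layer_py (layer_to_check : Int) (op_occupied_cwires : List Int) (used_cwires_per_layer : List (List Int)) (bit_map : List (Int × Int)) (out : Int) : Prop := ¬ D_recursive_find_mcm_stats_layer_py layer_to_check op_occupied_cwires used_cwires_per_layer bit_map → out = recursive_find_mcm_stats_layer_py_alt layer_to_check op_occupied_cwires used_cwires_per_layer bit_map
instance (layer_to_check : Int) (op_occupied_cwires : List Int) (used_cwires_per_layer : List (List Int)) (bit_map : List (Int × Int)) (out : Int) : Decidable (Spec_recursive_find_mcm_stats_layer_py layer_to_check op_occupied_cwires used_cwires_per_layer bit_map out) := by unfold Spec_recursive_find_mcm_stats_layer_py; infer_instance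

def pvDiffWitness_recursive_find_mcm_stats_layer_py : Int × List Int × List (List Int) × (List (Int × Int)) := (-2, [0], [[0], [1]], [])
def pvDiffWitnessOut_recursive_find_mcm_stats_layer_py : Int × Int := (-1, 0)

-- ===== CLAIM (what is proved, stated in full; the proofs are below) =====
def Claim_unchanged_recursive_find_mcm_stats_layer_py : Prop := ∀ (layer_to_check : Int) (op_occupied_cwires : List Int) (used_cwires_per_layer : List (List Int)) (bit_map : List (Int × Int)), Dom_recursive_find_mcm_stats_layer_py layer_to_check op_occupied_cwires used_cwires_per_layer bit_map → Pre_recursive_find_mcm_stats_layer_py layer_to_check op_occupied_cwires used_cwires_per_layer bit_map → Spec_recursive_find_mcm_stats_layer_py layer_to_check op_occupied_cwires used_cwires_per_layer bit_map (recursive_find_mcm_stats_layer_py layer_to_check op_occupied_cwires used_cwires_per_layer bit_map)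
def Claim_changed_recursive_find_mcm_stats_layer_py : Prop := Dom_recursive_find_mcm_stats_layer_py (pvDiffWitness_recursive_find_mcm_stats_layer_py.1) (pvDiffWitness_recursive_find_mcm_stats_layer_py.2.1) (pvDiffWitness_recursive_find_mcm_stats_layer_py.2.2.1) (pvDiffWitness_recursive_find_mcm_stats_layer_py.2.2.2) ∧ Pre_recursive_find_mcm_stats_layer_py (pvDiffWitness_recursive_find_mcm_stats_layer_py.1) (pvDiffWitness_recursive_find_mcm_stats_layer_py.2.1) (pvDiffWitness_recursive_find_mcm_stats_layer_py.2.2.1) (pvDiffWitness_recursive_find_mcm_stats_layer_py.2.2.2) ∧ D_recursive_find_mcm_stats_layer_py (pvDiffWitness_recursive_find_mcm_stats_layer_py.1) (pvDiffWitness_recursive_find_mcm_stats_layer_py.2.1) (pvDiffWitness_recursive_find_mcm_stats_layer_py.2.2.1) (pvDiffWitness_recursive_find_mcm_stats_layer_py.2.2.2) ∧ recursive_find_mcm_stats_layer_py (pvDiffWitness_recursive_find_mcm_stats_layer_py.1) (pvDiffWitness_recursive_find_mcm_stats_layer_py.2.1) (pvDiffWitness_recursive_find_mcm_stats_layer_py.2.2.1)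 (pvDiffWitness_recursive_find_mcm_stats_layer_py.2.2.2) = pvDiffWitnessOut_recursive_find_mcm_stats_layer_py.1 ∧ recursive_find_mcm_stats_layer_py_alt (pvDiffWitness_recursive_find_mcm_stats_layer_py.1) (pvDiffWitness_recursive_find_mcm_stats_layer_py.2.1) (pvDiffWitness_recursive_find_mcm_stats_layer_py.2.2.1) (pvDiffWitness_recursive_find_mcm_stats_layer_py.2.2.2) = pvDiffWitnessOut_recursive_find_mcm_stats_layer_py.2 ∧ pvDiffWitnessOut_recursive_find_mcm_stats_layer_py.1 ≠ pvDiffWitnessOut_recursive_find_mcm_stats_layer_py.2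
def Claim_exact_recursive_find_mcm_stats_layer_py : Prop := ∀ (layer_to_check : Int) (op_occupied_cwires : List Int) (used_cwires_per_layer : List (List Int)) (bit_map : List (Int × Int)), Dom_recursive_find_mcm_stats_layer_py layer_to_check op_occupied_cwires used_cwires_per_layer bit_map → Pre_recursive_find_mcm_stats_layer_py layer_to_check op_occupied_cwires used_cwires_per_layer bit_map → D_recursive_find_mcm_stats_layer_py layer_to_check op_occupied_cwires used_cwires_per_layer bit_map → recursive_find_mcm_stats_layer_py layer_to_check op_occupied_cwires used_cwires_per_layer bit_map ≠ recursive_find_mcm_stats_layer_py_alt layer_to_check op_occupied_cwires used_cwires_per_layer bit_map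

-- ===== LEMMAS AND PROOFS =====
lemma pvARec_eq_fold (occ : List Int) (layers : List (List Int)) :
    ∀ (n : Nat) (l : Int) (fuel : Nat), l.toNat = n → n + 1 ≤ fuel → 0 ≤ l → l < (layers.length : Int) →
      pvARec fuel l occ layers
        = (PySem.List.pyRange 0 (l + 1) 1).foldl
            (fun result i =>
              if pvInterNonempty occ (PySem.List.pyGetD layers i []) then i + 1 else result) 0 := by
  intro n
  induction n with
  | zero =>
    intro l fuel hn hfuel h0 hlt
    have hl : l = 0 := by omega
    subst hl
    obtain ⟨fuel', rfl⟩ : ∃ f, fuel = f + 1 := ⟨fuel - 1, by omega⟩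
    rw [show (0 : Int) + 1 = 0 + 1 from rfl, PySem.List.pyRange_one_singleton]
    have hlen : 0 < layers.length := by omega
    simp only [pvARec, PySem.List.pyGet?_zero, List.getElem?_eq_getElem hlen, List.foldl]
    rw [PySem.List.pyGetD_eq_getElem layers [] (by omega) (by omega)]
    norm_num
  | succ m ih =>
    intro l fuel hn hfuel h0 hlt
    obtain ⟨fuel', rfl⟩ : ∃ f, fuel = f + 1 := ⟨fuel - 1, by omega⟩
    have hlpos : 0 < l := by omega
    rw [PySem.List.pyRange_one_succ_right (by omega : (0:Int) ≤ l), List.foldl_append]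
    have hget : PySem.List.pyGet? layers l = some layers[l.toNat] :=
      PySem.List.pyGet?_eq_some_getElem layers (by omega) (by omega)
    show (match PySem.List.pyGet? layers l with
          | none => 0
          | some row =>
            if pvInterNonempty occ row then l + 1
            else if l = 0 then 0
            else pvARec fuel' (l - 1) occ layers) = _
    rw [hget]
    simp only [List.foldl]
    rw [PySem.List.pyGetD_eq_getElem layers [] (by omega) (by omega)]
    by_cases h : pvInterNonempty occ layers[l.toNat]
    · simp [h]
    · simp only [h, Bool.false_eq_true, if_false]
      rw [if_neg (by omega : ¬ l = 0)]
      have hih := ih (l - 1) fuel' (by omega) (by omega) (by omega) (by omega)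
      rw [show l - 1 + 1 = l by ring] at hih
      exact hih

-- the Python-set truthiness 'occ & row' as a plain existential
lemma pvInter_iff (occ row : List Int) :
    pvInterNonempty occ row = true ↔ ∃ x ∈ occ, x ∈ row := by
  unfold pvInterNonempty
  rw [Bool.not_eq_eq_eq_not, Bool.not_true, List.isEmpty_eq_false_iff_exists_mem]
  constructor
  · rintro ⟨x, hx⟩
    have := (PySem.Set.mem_inter occ row x).mp hx
    exact ⟨x, this.1, this.2⟩
  · rintro ⟨x, hx, hx'⟩
    exact ⟨x, (PySem.Set.mem_inter occ row x).mpr ⟨hx, hx'⟩⟩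

-- inside the wraparound region (with a hit below, and no l = -1 last-layer hit) A's value is negative
lemma pvARec_neg (occ : List Int) (layers : List (List Int)) :
    ∀ (n : Nat) (l : Int) (fuel : Nat),
      (l + (layers.length : Int)).toNat = n → l < 0 → -(layers.length : Int) ≤ l → n + 2 ≤ fuel →
      (∃ row ∈ layers.take (n + 1), ∃ x ∈ occ, x ∈ row) →
      (l = -1 → ¬ ∃ x ∈ occ, x ∈ layers.getLastD []) →
      pvARec fuel l occ layers < 0 := by
  intro n
  induction n with
  | zero =>
    intro l fuel hn hl0 hlb hfuel hhit hlast
    obtain ⟨fuel', rfl⟩ : ∃ f, fuel = f + 1 := ⟨fuel - 1, by omega⟩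
    have hlen : 0 < layers.length := by omega
    have hget : PySem.List.pyGet? layers l = some layers[0] := by
      have hk : l = -(((-l).toNat : Nat) : Int) := by omega
      rw [hk, PySem.List.pyGet?_neg_natCast layers (-l).toNat (by omega) (by omega)]
      rw [show layers.length - (-l).toNat = 0 by omega]
      exact List.getElem?_eq_getElem hlen
    obtain ⟨row, hmem, hx⟩ := hhit
    have hrow : row = layers[0] := by
      cases layers with
      | nil => simp at hlen
      | cons a t => simpa using hmem
    subst hrow
    have hne1 : l ≠ -1 := by
      intro hl1
      apply hlast hl1
      obtain ⟨a, rfl⟩ := List.length_eq_one_iff.mp (show layers.length = 1 by omega)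
      simpa using hx
    have hc := (pvInter_iff occ layers[0]).mpr hx
    show (match PySem.List.pyGet? layers l with
          | none => 0
          | some row =>
            if pvInterNonempty occ row then l + 1
            else if l = 0 then 0
            else pvARec fuel' (l - 1) occ layers) < 0
    rw [hget]
    simp only [hc, if_true]
    have h2 : l ≤ -2 := by omega
    linarith
  | succ m ih =>
    intro l fuel hn hl0 hlb hfuel hhit hlast
    obtain ⟨fuel', rfl⟩ : ∃ f, fuel = f + 1 := ⟨fuel - 1, by omega⟩
    have hm1 : m + 1 < layers.length := by omega
    have hne : layers ≠ [] := by intro hc; subst hc; simp at hm1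
    have hget : PySem.List.pyGet? layers l = some layers[m + 1] := by
      have hk : l = -(((-l).toNat : Nat) : Int) := by omega
      rw [hk, PySem.List.pyGet?_neg_natCast layers (-l).toNat (by omega) (by omega)]
      rw [show layers.length - (-l).toNat = m + 1 by omega]
      exact List.getElem?_eq_getElem hm1
    show (match PySem.List.pyGet? layers l with
          | none => 0
          | some row =>
            if pvInterNonempty occ row then l + 1
            else if l = 0 then 0
            else pvARec fuel' (l - 1) occ layers) < 0
    rw [hget]
    by_cases hhit0 : pvInterNonempty occ layers[m + 1]
    · have hne1 : l ≠ -1 := by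
        intro hl1
        apply hlast hl1
        have hlastd : layers.getLastD [] = layers[m + 1] := by
          rw [List.getLastD_eq_getLast?, List.getLast?_eq_getLast hne, Option.getD_some,
            List.getLast_eq_getElem]
          congr 1
          omega
        rw [hlastd]
        exact (pvInter_iff occ layers[m + 1]).mp hhit0
      simp only [hhit0, if_true]
      have h2 : l ≤ -2 := by omega
      linarith
    · simp only [hhit0, Bool.false_eq_true, if_false]
      rw [if_neg (by omega : ¬ l = 0)]
      apply ih (l - 1) fuel' (by omega) (by omega) (by omega) (by omega)
      · obtain ⟨row, hmem, hx⟩ := hhit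
        rw [List.take_add_one, List.getElem?_eq_getElem hm1] at hmem
        rcases List.mem_append.mp hmem with hin | hsing
        · exact ⟨row, hin, hx⟩
        · exfalso
          have : row = layers[m + 1] := by simpa using hsing
          subst this
          exact hhit0 ((pvInter_iff occ _).mpr hx)
      · intro hc
        exact absurd hc (by omega)

-- ===== VERDICT (by name: the statement is the Claim_ definition above) =====
theorem recursive_find_mcm_stats_layer_py_spec : Claim_unchanged_recursive_find_mcm_stats_layer_py := by
  intro l occ layers bm _ hpre hnd
  unfold recursive_find_mcm_stats_layer_py recursive_find_mcm_stats_layer_py_alt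
  by_cases hl : 0 ≤ l
  · have hlt : l < (layers.length : Int) := by
      rcases hpre with ⟨_, h⟩ | ⟨h, _⟩
      · exact h
      · omega
    exact pvARec_eq_fold occ layers l.toNat l _ rfl (by omega) hl hlt
  · -- l < 0: ¬D_ forces l = -1 with the last layer intersecting; both sides compute 0
    unfold D_recursive_find_mcm_stats_layer_py at hnd
    push_neg at hnd
    obtain ⟨hl1, hhit⟩ := hnd (by omega)
    subst hl1
    have hne : layers ≠ [] := by
      rcases hpre with ⟨h, _⟩ | ⟨_, h, _⟩
      · omega
      · intro hc; subst hc; simp at h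
    have hfuel : (-1 + (layers.length : Int)).toNat + 2 = ((-1 + (layers.length : Int)).toNat + 1) + 1 := rfl
    rw [hfuel]
    show (match PySem.List.pyGet? layers (-1) with
          | none => 0
          | some row =>
            if pvInterNonempty occ row then (-1 : Int) + 1
            else if (-1 : Int) = 0 then 0
            else pvARec ((-1 + (layers.length : Int)).toNat + 1) ((-1 : Int) - 1) occ layers) = _
    rw [PySem.List.pyGet?_neg_one, List.getLast?_eq_getLast hne]
    have hrow : pvInterNonempty occ (layers.getLast hne) = true := by
      rw [pvInter_iff]
      simpa [List.getLastD_eq_getLast?, List.getLast?_eq_getLast hne] using hhit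
    simp only [hrow, if_true]
    rw [show (-1 : Int) + 1 = 0 from rfl, PySem.List.pyRange_one_eq_nil (by omega)]
    simp [List.foldl]

theorem recursive_find_mcm_stats_layer_py_changed : Claim_changed_recursive_find_mcm_stats_layer_py := by
  unfold Claim_changed_recursive_find_mcm_stats_layer_py; decide

theorem recursive_find_mcm_stats_layer_py_tight : Claim_exact_recursive_find_mcm_stats_layer_py := by
  intro l occ layers bm _ hpre hd
  obtain ⟨hl0, hnot⟩ := hd
  obtain ⟨_, hlb, hhit⟩ :
      l < 0 ∧ -(layers.length : Int) ≤ l ∧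
        ∃ row ∈ layers.take (l + layers.length + 1).toNat, ∃ x ∈ occ, x ∈ row := by
    rcases hpre with ⟨h, _⟩ | h
    · omega
    · exact h
  unfold recursive_find_mcm_stats_layer_py recursive_find_mcm_stats_layer_py_alt
  rw [PySem.List.pyRange_one_eq_nil (by omega : l + 1 ≤ 0)]
  have hA : pvARec ((l + (layers.length : Int)).toNat + 2) l occ layers < 0 := by
    apply pvARec_neg occ layers (l + (layers.length : Int)).toNat l _ rfl hl0 hlb (by omega)
    · rw [show (l + (layers.length : Int)).toNat + 1 = (l + layers.length + 1).toNat by omega]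
      exact hhit
    · intro hl1 hx
      exact hnot ⟨hl1, hx⟩
  simp only [List.foldl]
  omega
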